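-- pv_equiv track=rewrite | github.com/krjj21/TradingAgents | FinWorld/finworld/plot/distribution.py | _create_color_scheme
-- ===== SOURCE A (Python) =====
-- from typing import List, Dict
--
-- def _create_color_scheme(symbols: List[str]) -> Dict[str, str]:
--     """
--     Create a high-contrast color scheme by cyclically selecting from darker yellow, green, and blue color families.
--
--     Args:
--         symbols (List[str]): A list of stock or dataset symbols.
--
--     Returns:
--         Dict[str, str]: A dictionary mapping each symbol to a unique color.
--     """
--
--     # Define darker yellow color family
--     yellow_colors = [
--         "#FFB74D", "#FFA726", "#FF9800", "#FB8C00",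
--         "#F57C00", "#EF6C00", "#E65100"
--     ]
--
--     # Define darker green color family
--     green_colors = [
--         "#81C784", "#66BB6A", "#4CAF50", "#43A047",
--         "#388E3C", "#2E7D32", "#1B5E20"
--     ]
--
--     # Define darker blue color family
--     blue_colors = [
--         "#64B5F6", "#42A5F5", "#2196F3", "#1E88E5",
--         "#1976D2", "#1565C0", "#0D47A1"
--     ]
--
--     # Group colors by family for round-robin assignment
--     color_families = [yellow_colors, green_colors, blue_colors]
--
--     color_scheme = {}
--     family_index = 0  # Tracks which color family to use
--     color_indices = [0, 0, 0]  # Individual index for each color family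
--
--     for symbol in symbols:
--         # Select current color family
--         family = color_families[family_index]
--         # Select color from the current family
--         color = family[color_indices[family_index] % len(family)]
--         # Assign color to the symbol
--         color_scheme[symbol] = color
--         # Update the index for current family
--         color_indices[family_index] += 1
--         # Rotate to next family
--         family_index = (family_index + 1) % len(color_families)
--
--     return color_scheme
-- ===== SOURCE B (Python) =====
-- from typing import List, Dict
--
-- def _create_color_scheme(symbols: List[str]) -> Dict[str, str]:
--     yellow_colors = [
--         "#FFB74D", "#FFA726", "#FF9800", "#FB8C00",
--         "#F57C00", "#EF6C00", "#E65100"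
--     ]
--     green_colors = [
--         "#81C784", "#66BB6A", "#4CAF50", "#43A047",
--         "#388E3C", "#2E7D32", "#1B5E20"
--     ]
--     blue_colors = [
--         "#64B5F6", "#42A5F5", "#2196F3", "#1E88E5",
--         "#1976D2", "#1565C0", "#0D47A1"
--     ]
--     families = [yellow_colors, green_colors, blue_colors]
--     # The round-robin assignment repeats with period 21; precompute that cycle once.
--     cycle = [families[k % 3][(k // 3) % len(families[k % 3])] for k in range(21)]
--     return {symbol: cycle[i % 21] for i, symbol in enumerate(symbols)}
-- ===== Notes on version B (the rewrite author's own statement) =====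
-- stated objective: simpler
-- what changed: Replaces the mutable family_index/color_indices round-robin bookkeeping with a precomputed 21-color repeating cycle and a dict comprehension assigning cycle[i % 21] to the i-th symbol.
import Mathlib
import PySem

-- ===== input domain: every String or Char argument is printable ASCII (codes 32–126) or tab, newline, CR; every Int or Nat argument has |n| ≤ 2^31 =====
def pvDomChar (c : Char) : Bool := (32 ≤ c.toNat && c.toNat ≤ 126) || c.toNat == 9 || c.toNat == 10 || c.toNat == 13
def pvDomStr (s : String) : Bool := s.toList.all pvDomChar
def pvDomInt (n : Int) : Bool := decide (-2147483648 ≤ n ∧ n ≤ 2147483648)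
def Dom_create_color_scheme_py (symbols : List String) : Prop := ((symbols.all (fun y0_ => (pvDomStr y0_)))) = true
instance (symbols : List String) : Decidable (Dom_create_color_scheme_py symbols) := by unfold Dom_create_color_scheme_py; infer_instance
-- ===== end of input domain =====

-- B replaces A's mutable family_index/color_indices bookkeeping with a precomputed
-- 21-color repeating cycle indexed by the symbol's position (simpler decomposition).

-- ===== PORT A =====
def pvYellowA : List String :=
  ["#FFB74D", "#FFA726", "#FF9800", "#FB8C00", "#F57C00", "#EF6C00", "#E65100"]
def pvGreenA : List String :=
  ["#81C784", "#66BB6A", "#4CAF50", "#43A047", "#388E3C", "#2E7D32", "#1B5E20"]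
def pvBlueA : List String :=
  ["#64B5F6", "#42A5F5", "#2196F3", "#1E88E5", "#1976D2", "#1565C0", "#0D47A1"]
def pvFamiliesA : List (List String) := [pvYellowA, pvGreenA, pvBlueA]

-- loop body of A: state = (color_scheme, family_index, color_indices); all counters
-- stay nonnegative so they are carried as Nat (Python's % agrees with Nat.% here)
def pvStepA (st : PySem.Dict String String × Nat × List Nat) (symbol : String) :
    PySem.Dict String String × Nat × List Nat :=
  let d := st.1
  let fi := st.2.1
  let ci := st.2.2
  let family := pvFamiliesA.getD fi []
  let color := family.getD (ci.getD fi 0 % family.length) ""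
  let d' := d.insert symbol color
  let ci' := ci.set fi (ci.getD fi 0 + 1)
  (d', (fi + 1) % pvFamiliesA.length, ci')

def create_color_scheme_py (symbols : List String) : List (String × String) :=
  (symbols.foldl pvStepA (PySem.Dict.empty, 0, [0, 0, 0])).1.items

-- ===== PORT B =====
def pvFamiliesB : List (List String) :=
  [["#FFB74D", "#FFA726", "#FF9800", "#FB8C00", "#F57C00", "#EF6C00", "#E65100"],
   ["#81C784", "#66BB6A", "#4CAF50", "#43A047", "#388E3C", "#2E7D32", "#1B5E20"],
   ["#64B5F6", "#42A5F5", "#2196F3", "#1E88E5", "#1976D2", "#1565C0", "#0D47A1"]]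

-- cycle = [families[k % 3][(k // 3) % len(families[k % 3])] for k in range(21)]
def pvCycleB : List String :=
  (List.range 21).map (fun k =>
    (pvFamiliesB.getD (k % 3) []).getD ((k / 3) % (pvFamiliesB.getD (k % 3) []).length) "")

def create_color_scheme_py_alt (symbols : List String) : List (String × String) :=
  ((PySem.List.enumerate symbols).foldl
    (fun d p => d.insert p.2 (pvCycleB.getD (PySem.Int.mod p.1 21).toNat ""))
    PySem.Dict.empty).items

-- ===== PRECONDITION & SPEC =====
def Spec_create_color_scheme_py (symbols : List String) (out : List (String × String)) : Prop := out = create_color_scheme_py_alt symbols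
instance (symbols : List String) (out : List (String × String)) : Decidable (Spec_create_color_scheme_py symbols out) := by unfold Spec_create_color_scheme_py; infer_instance

-- ===== CLAIM (what is proved, stated in full; the proofs are below) =====
def Claim_equal_create_color_scheme_py : Prop := ∀ (symbols : List String), Dom_create_color_scheme_py symbols → Spec_create_color_scheme_py symbols (create_color_scheme_py symbols)

-- ===== LEMMAS AND PROOFS =====

-- B's cycle entry at i % 21 is exactly A's family/in-family-index color at step i
lemma pv_colorB_eq (i : Nat) :
    pvCycleB.getD (i % 21) "" = (pvFamiliesA.getD (i % 3) []).getD ((i / 3) % 7) "" := by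
  have h3 : i % 21 % 3 = i % 3 := by omega
  have h7 : i % 21 / 3 = (i / 3) % 7 := by omega
  have h : ∀ r < 21, pvCycleB.getD r "" = (pvFamiliesA.getD (r % 3) []).getD (r / 3) "" := by
    decide
  rw [← h3, ← h7]
  exact h (i % 21) (by omega)

-- A's loop body, started from the state reached after i iterations
lemma pv_stepA_eq (d : PySem.Dict String String) (i : Nat) (x : String) :
    pvStepA (d, i % 3, [(i + 2) / 3, (i + 1) / 3, i / 3]) x
      = (d.insert x (pvCycleB.getD (i % 21) ""),
         (i + 1) % 3, [(i + 3) / 3, (i + 2) / 3, (i + 1) / 3]) := by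
  rw [pv_colorB_eq]
  have h : i % 3 = 0 ∨ i % 3 = 1 ∨ i % 3 = 2 := by omega
  rcases h with h | h | h
  · obtain ⟨q, rfl⟩ : ∃ q, i = 3 * q := ⟨i / 3, by omega⟩
    simp only [show (3 * q) % 3 = 0 from by omega, show (3 * q + 2) / 3 = q from by omega,
      show (3 * q + 1) / 3 = q from by omega, show (3 * q) / 3 = q from by omega,
      show (3 * q + 3) / 3 = q + 1 from by omega, show (3 * q + 1) % 3 = 1 from by omega]
    simp [pvStepA, pvFamiliesA, pvYellowA, pvGreenA, pvBlueA, List.getD, List.set]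
  · obtain ⟨q, rfl⟩ : ∃ q, i = 3 * q + 1 := ⟨i / 3, by omega⟩
    simp only [show (3 * q + 1) % 3 = 1 from by omega, show (3 * q + 3) / 3 = q + 1 from by omega,
      show (3 * q + 2) / 3 = q from by omega, show (3 * q + 1) / 3 = q from by omega,
      show (3 * q + 1 + 3) / 3 = q + 1 from by omega, show (3 * q + 1 + 1) % 3 = 2 from by omega]
    simp [pvStepA, pvFamiliesA, pvYellowA, pvGreenA, pvBlueA, List.getD, List.set]
  · obtain ⟨q, rfl⟩ : ∃ q, i = 3 * q + 2 := ⟨i / 3, by omega⟩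
    simp only [show (3 * q + 2) % 3 = 2 from by omega, show (3 * q + 2 + 2) / 3 = q + 1 from by omega,
      show (3 * q + 2 + 1) / 3 = q + 1 from by omega, show (3 * q + 2) / 3 = q from by omega,
      show (3 * q + 2 + 3) / 3 = q + 1 from by omega, show (3 * q + 2 + 1) % 3 = 0 from by omega]
    simp [pvStepA, pvFamiliesA, pvYellowA, pvGreenA, pvBlueA, List.getD, List.set]

-- the two folds agree from any dict and any step counter i
lemma pv_fold_eq (symbols : List String) (d : PySem.Dict String String) (i : Nat) :
    (symbols.foldl pvStepA (d, i % 3, [(i + 2) / 3, (i + 1) / 3, i / 3])).1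
      = (PySem.List.enumerate symbols (i : Int)).foldl
          (fun d p => d.insert p.2 (pvCycleB.getD (PySem.Int.mod p.1 21).toNat "")) d := by
  induction symbols generalizing d i with
  | nil => simp [PySem.List.enumerate_nil]
  | cons x xs ih =>
    rw [PySem.List.enumerate_cons, List.foldl_cons, List.foldl_cons, pv_stepA_eq]
    have hm : (PySem.Int.mod (i : Int) 21).toNat = i % 21 := by
      rw [PySem.Int.mod_eq_emod_of_pos (by norm_num)]; omega
    rw [hm]
    have : ((i : Int) + 1) = ((i + 1 : Nat) : Int) := by push_cast; ring
    rw [this]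
    exact ih _ (i + 1)

-- ===== VERDICT (by name: the statement is the Claim_ definition above) =====
theorem create_color_scheme_py_spec : Claim_equal_create_color_scheme_py := by
  intro symbols _
  unfold Spec_create_color_scheme_py create_color_scheme_py create_color_scheme_py_alt
  congr 1
  simpa using pv_fold_eq symbols PySem.Dict.empty 0
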